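-- pv_equiv track=rewrite | github.com/choyeongwook/Algorithm | Programmers/Lv2/n^2배열 자르기.py | solution
-- ===== SOURCE A (Python) =====
-- def solution(n, left, right):
--     array = []
--     start_line = left // n
--     end_line = right // n
--
--     start_index = left % n
--     end_index = right % n
--
--     for i in range(start_line, end_line+1):
--         for j in range(n):
--             if i == start_line and j < start_index:
--                 continue
--             if i == end_line and j > end_index:
--                 continue
--
--             if i < j:
--                 array.append(j+1)
--             else:
--                 array.append(i+1)
--     return(array)
-- ===== SOURCE B (Python) =====
-- def solution(n, left, right):
--     return [max(k // n, k % n) + 1 for k in range(left, right + 1)]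
-- ===== Notes on version B (the rewrite author's own statement) =====
-- stated objective: simpler
-- what changed: Replaces the nested row/column loops with four boundary variables and continue-guards by a single pass over the flat index range left..right computing max(k//n, k%n)+1 directly; A also visits the skipped cells of the first and last row, B touches only the right-left+1 output cells.
-- outside the precondition, e.g. on solution(-3, 0, 2): A returns [], B returns [1, 0, 0]
import Mathlib
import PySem

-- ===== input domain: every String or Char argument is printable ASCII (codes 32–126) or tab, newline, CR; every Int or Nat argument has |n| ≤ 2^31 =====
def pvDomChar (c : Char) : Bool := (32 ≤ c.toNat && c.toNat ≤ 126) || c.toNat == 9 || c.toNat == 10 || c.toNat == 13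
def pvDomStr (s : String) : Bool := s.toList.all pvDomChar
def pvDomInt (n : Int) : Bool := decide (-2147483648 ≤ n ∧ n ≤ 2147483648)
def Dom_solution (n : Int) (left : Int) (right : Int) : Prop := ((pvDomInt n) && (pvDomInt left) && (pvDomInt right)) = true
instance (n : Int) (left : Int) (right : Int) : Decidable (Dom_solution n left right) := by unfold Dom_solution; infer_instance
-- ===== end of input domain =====

-- B replaces the nested row/column loops with boundary bookkeeping by one flat pass computing max(k//n, k%n)+1 (simpler).

-- ===== PORT A =====
def solution (n : Int) (left : Int) (right : Int) : List Int :=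
  let start_line := PySem.Int.floordiv left n
  let end_line := PySem.Int.floordiv right n
  let start_index := PySem.Int.mod left n
  let end_index := PySem.Int.mod right n
  (PySem.List.pyRange start_line (end_line + 1) 1).foldl (fun array i =>
    (PySem.List.pyRange 0 n 1).foldl (fun array j =>
      if i = start_line ∧ j < start_index then array
      else if i = end_line ∧ end_index < j then array
      else if i < j then array ++ [j + 1]
      else array ++ [i + 1]) array) []

-- ===== PORT B =====
def solution_alt (n : Int) (left : Int) (right : Int) : List Int :=
  (PySem.List.pyRange left (right + 1) 1).map
    (fun k => max (PySem.Int.floordiv k n) (PySem.Int.mod k n) + 1)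

-- ===== PRECONDITION & SPEC =====
-- Pre_ excludes n ≤ 0, outside the puzzle's domain: for n = 0 A raises ZeroDivisionError,
-- and for n < 0 A's empty result is an accident of range(n) being empty.
def Pre_solution (n : Int) (left : Int) (right : Int) : Prop := 1 ≤ n
instance (n : Int) (left : Int) (right : Int) : Decidable (Pre_solution n left right) := by unfold Pre_solution; infer_instance
def pvWitness_solution : Int × Int × Int := (3, 2, 5)

def Spec_solution (n : Int) (left : Int) (right : Int) (out : List Int) : Prop := out = solution_alt n left right
instance (n : Int) (left : Int) (right : Int) (out : List Int) : Decidable (Spec_solution n left right out) := by unfold Spec_solution; infer_instance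

-- ===== CLAIM (what is proved, stated in full; the proofs are below) =====
def Claim_equal_solution : Prop := ∀ (n : Int) (left : Int) (right : Int), Dom_solution n left right → Pre_solution n left right → Spec_solution n left right (solution n left right)

-- ===== LEMMAS AND PROOFS =====

-- B's per-cell value, on ediv/emod (valid for 0 < n by floordiv_eq_ediv_of_pos / mod_eq_emod_of_pos)
def gfun (n k : Int) : Int := max (k / n) (k % n) + 1

-- A's algorithm with the four boundary locals rewritten to ediv/emod (equal to `solution` for 0 < n)
def solA (n l r : Int) : List Int :=
  (PySem.List.pyRange (l / n) (r / n + 1) 1).foldl (fun array i =>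
    (PySem.List.pyRange 0 n 1).foldl (fun array j =>
      if i = l / n ∧ j < l % n then array
      else if i = r / n ∧ r % n < j then array
      else if i < j then array ++ [j + 1]
      else array ++ [i + 1]) array) []

lemma solution_eq_solA (n l r : Int) (hn : 0 < n) : solution n l r = solA n l r := by
  simp only [solution, solA, PySem.Int.floordiv_eq_ediv_of_pos hn, PySem.Int.mod_eq_emod_of_pos hn]

lemma filter_pyRange_interval (lo hi : Int) (p : Int → Bool)
    (hp : ∀ j, (p j = true) ↔ (lo ≤ j ∧ j ≤ hi)) :
    ∀ (d : Nat) (a b : Int), (b - a).toNat ≤ d →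
      (PySem.List.pyRange a b 1).filter p = PySem.List.pyRange (max a lo) (min b (hi + 1)) 1 := by
  intro d
  induction d with
  | zero =>
    intro a b h
    rw [PySem.List.pyRange_one_eq_nil (by omega), PySem.List.pyRange_one_eq_nil (by omega)]
    rfl
  | succ d ih =>
    intro a b h
    by_cases hab : b ≤ a
    · rw [PySem.List.pyRange_one_eq_nil hab, PySem.List.pyRange_one_eq_nil (by omega)]
      rfl
    · push_neg at hab
      rw [PySem.List.pyRange_one_cons hab, List.filter_cons, ih (a + 1) b (by omega)]
      by_cases hpa : p a = true
      · rw [hp] at hpa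
        simp only [hp a, hpa, and_self, if_pos]
        have h1 : max a lo = a := by omega
        have h2 : max (a + 1) lo = a + 1 := by omega
        rw [h1, h2]
        conv_rhs => rw [PySem.List.pyRange_one_cons (show a < min b (hi + 1) by omega)]
      · simp only [hpa, if_neg, Bool.false_eq_true, not_false_iff, ite_false]
        rw [hp] at hpa
        push_neg at hpa
        by_cases hlo : a < lo
        · have h1 : max a lo = lo := by omega
          have h2 : max (a + 1) lo = lo := by omega
          rw [h1, h2]
        · have hhi : hi < a := by omega
          rw [PySem.List.pyRange_one_eq_nil (by omega), PySem.List.pyRange_one_eq_nil (by omega)]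

lemma pyRange_shift (c : Int) : ∀ (a b : Int),
    PySem.List.pyRange (c + a) (c + b) 1 = (PySem.List.pyRange a b 1).map (fun j => c + j) := by
  intro a b
  rw [PySem.List.pyRange_one, PySem.List.pyRange_one]
  have h : (c + b - (c + a)).toNat = (b - a).toNat := by omega
  rw [h, List.map_map]
  apply List.map_congr_left
  intro k _
  simp only [Function.comp]
  omega

lemma gfun_cell (n i j : Int) (hn : 0 < n) (h0 : 0 ≤ j) (hj : j < n) :
    gfun n (i * n + j) = max i j + 1 := by
  unfold gfun
  have hne : n ≠ 0 := by omega
  have hd : (i * n + j) / n = i := by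
    rw [add_comm, Int.add_mul_ediv_right j i hne, Int.ediv_eq_zero_of_lt h0 hj, zero_add]
  have hm : (i * n + j) % n = j := by
    rw [add_comm, Int.add_mul_emod_self_right, Int.emod_eq_of_lt h0 hj]
  rw [hd, hm]

-- One inner row: the guarded loop over range(n) appends exactly the cells of one flat segment.
lemma row_eq (n sl si el ei i lo hi : Int) (hn : 0 < n) (hlo : 0 ≤ lo) (hhi : hi < n)
    (hcond : ∀ j, 0 ≤ j → j < n →
      ((¬(i = sl ∧ j < si) ∧ ¬(i = el ∧ ei < j)) ↔ (lo ≤ j ∧ j ≤ hi)))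
    (acc : List Int) :
    (PySem.List.pyRange 0 n 1).foldl (fun array j =>
      if i = sl ∧ j < si then array
      else if i = el ∧ ei < j then array
      else if i < j then array ++ [j + 1]
      else array ++ [i + 1]) acc
    = acc ++ (PySem.List.pyRange (i * n + lo) (i * n + hi + 1) 1).map (gfun n) := by
  have step1 : (PySem.List.pyRange 0 n 1).foldl (fun array j =>
      if i = sl ∧ j < si then array
      else if i = el ∧ ei < j then array
      else if i < j then array ++ [j + 1]
      else array ++ [i + 1]) acc
      = (PySem.List.pyRange 0 n 1).foldl (fun array j =>
        if (decide (lo ≤ j) && decide (j ≤ hi)) then array ++ [max i j + 1] else array) acc := by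
    apply PySem.List.foldl_congr_mem
    intro a j hj
    rw [PySem.List.mem_pyRange_one] at hj
    have hc := hcond j hj.1 hj.2
    by_cases h1 : i = sl ∧ j < si
    · have : ¬(lo ≤ j ∧ j ≤ hi) := by tauto
      simp [h1, this]
    · by_cases h2 : i = el ∧ ei < j
      · have : ¬(lo ≤ j ∧ j ≤ hi) := by tauto
        simp [h1, h2, this]
      · have h3 : lo ≤ j ∧ j ≤ hi := by tauto
        by_cases h4 : i < j
        · have : max i j = j := max_eq_right (le_of_lt h4)
          simp [h1, h2, h3.1, h3.2, h4, this]
        · have : max i j = i := max_eq_left (by omega)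
          simp [h1, h2, h3.1, h3.2, h4, this]
  rw [step1, PySem.List.foldl_append_if]
  rw [filter_pyRange_interval lo hi _ (by intro j; simp) n.toNat 0 n (by omega)]
  have h1 : max 0 lo = lo := by omega
  have h2 : min n (hi + 1) = hi + 1 := by omega
  rw [h1, h2]
  congr 1
  have hs : PySem.List.pyRange (i * n + lo) (i * n + (hi + 1)) 1
      = (PySem.List.pyRange lo (hi + 1) 1).map (fun j => i * n + j) := pyRange_shift (i * n) lo (hi + 1)
  have h3 : i * n + hi + 1 = i * n + (hi + 1) := by omega
  rw [h3, hs, List.map_map]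
  apply List.map_congr_left
  intro j hj
  rw [PySem.List.mem_pyRange_one] at hj
  simp only [Function.comp]
  exact (gfun_cell n i j hn (by omega) (by omega)).symm

lemma main_eq (n : Int) (hn : 0 < n) :
    ∀ (d : Nat) (l r : Int), (r / n - l / n).toNat ≤ d →
      solA n l r = (PySem.List.pyRange l (r + 1) 1).map (gfun n) := by
  have hne : n ≠ 0 := by omega
  intro d
  induction d with
  | zero =>
    intro l r h
    have hl := Int.ediv_add_emod l n
    have hr := Int.ediv_add_emod r n
    have hlm0 := Int.emod_nonneg l hne
    have hlmn := Int.emod_lt_of_pos l hn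
    have hrm0 := Int.emod_nonneg r hne
    have hrmn := Int.emod_lt_of_pos r hn
    by_cases hlt : r / n < l / n
    · -- no full row: both sides empty
      unfold solA
      have key : n * (r / n) ≤ n * (l / n - 1) := mul_le_mul_of_nonneg_left (by omega) (by omega)
      have hrl : r + 1 ≤ l := by linarith
      rw [PySem.List.pyRange_one_eq_nil hrl,
        PySem.List.pyRange_one_eq_nil (show r / n + 1 ≤ l / n by omega)]
      rfl
    · have heq : r / n = l / n := by omega
      unfold solA
      rw [show r / n + 1 = l / n + 1 by omega, PySem.List.pyRange_one_singleton]
      have hrow := row_eq n (l / n) (l % n) (r / n) (r % n) (l / n) (l % n) (r % n) hn hlm0 hrmn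
        (by intro j hj0 hjn; rw [heq]; omega) []
      simp only [List.foldl_cons, List.foldl_nil]
      simp only [eq_self_iff_true, true_and] at hrow ⊢
      rw [hrow]
      rw [heq] at hr
      have e1 : l / n * n + l % n = l := by linarith
      have e2 : l / n * n + r % n + 1 = r + 1 := by linarith
      rw [List.nil_append, e1, e2]
  | succ d ih =>
    intro l r h
    by_cases hd : (r / n - l / n).toNat ≤ d
    · exact ih l r hd
    · have hgt : l / n < r / n := by omega
      have hl := Int.ediv_add_emod l n
      have hr := Int.ediv_add_emod r n
      have hlm0 := Int.emod_nonneg l hne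
      have hlmn := Int.emod_lt_of_pos l hn
      have hrm0 := Int.emod_nonneg r hne
      have hrmn := Int.emod_lt_of_pos r hn
      set el := r / n with hel
      set r' := el * n - 1 with hr'
      have hr'd : r' / n = el - 1 := by
        rw [hr']
        have : el * n - 1 = (n - 1) + (el - 1) * n := by ring
        rw [this, Int.add_mul_ediv_right _ _ hne, Int.ediv_eq_zero_of_lt (by omega) (by omega), zero_add]
      have hr'm : r' % n = n - 1 := by
        rw [hr']
        have : el * n - 1 = (n - 1) + (el - 1) * n := by ring
        rw [this, Int.add_mul_emod_self_right, Int.emod_eq_of_lt (by omega) (by omega)]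
      -- split the outer row loop at the last row
      unfold solA
      rw [PySem.List.pyRange_one_succ_right (show l / n ≤ el by omega), List.foldl_append]
      simp only [List.foldl_cons, List.foldl_nil]
      -- the fold over the first rows equals solA n l r'
      have hfirst : (PySem.List.pyRange (l / n) el 1).foldl (fun array i =>
          (PySem.List.pyRange 0 n 1).foldl (fun array j =>
            if i = l / n ∧ j < l % n then array
            else if i = el ∧ r % n < j then array
            else if i < j then array ++ [j + 1]
            else array ++ [i + 1]) array) []
          = solA n l r' := by
        unfold solA
        rw [hr'd, hr'm]
        have hsp : el - 1 + 1 = el := by omega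
        rw [hsp]
        apply PySem.List.foldl_congr_mem
        intro a i hi
        rw [PySem.List.mem_pyRange_one] at hi
        apply PySem.List.foldl_congr_mem
        intro a' j hj
        rw [PySem.List.mem_pyRange_one] at hj
        have h1 : ¬(i = el ∧ r % n < j) := by omega
        have h2 : ¬(i = el - 1 ∧ n - 1 < j) := by omega
        simp only [h1, h2, if_neg, not_false_iff, ite_false]
      rw [hfirst, ih l r' (by omega)]
      -- the last row
      rw [row_eq n (l / n) (l % n) el (r % n) el 0 (r % n) hn le_rfl hrmn
        (by intro j hj0 hjn; constructor <;> intro hc <;> omega) _]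
      have key2 : n * (l / n) ≤ n * (el - 1) := mul_le_mul_of_nonneg_left (by omega) (by omega)
      have hlle : l ≤ el * n := by linarith
      have h0 : el * n + 0 = r' + 1 := by omega
      have h1 : el * n + r % n + 1 = r + 1 := by linarith
      rw [h0, h1, ← List.map_append, ← PySem.List.pyRange_one_append l (r' + 1) (r + 1) (by linarith) (by linarith)]

lemma alt_eq_map (n l r : Int) (hn : 0 < n) :
    solution_alt n l r = (PySem.List.pyRange l (r + 1) 1).map (gfun n) := by
  unfold solution_alt
  apply List.map_congr_left
  intro k _
  rw [gfun, PySem.Int.floordiv_eq_ediv_of_pos hn, PySem.Int.mod_eq_emod_of_pos hn]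

-- ===== VERDICT (by name: the statement is the Claim_ definition above) =====
theorem solution_spec : Claim_equal_solution := by
  intro n l r _ hpre
  have hn : 0 < n := hpre
  unfold Spec_solution
  rw [solution_eq_solA n l r hn, alt_eq_map n l r hn]
  exact main_eq n hn (r / n - l / n).toNat l r le_rfl
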